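-- pv_equiv track=rewrite | github.com/tudormihaita/cxr-report-gen | data/__init__.py | build_image_text_similarity_mappings
-- ===== SOURCE A (Python) =====
-- from collections import defaultdict
--
-- def build_image_text_similarity_mappings(texts, uids):
--     """
--     Create a mapping between semantically identical texts and their corresponding imaging studies.
--     This helps in computing retrieval metrics.
--     :param texts: list of texts, one for each sample
--     :param uids: list of unique identifiers for the images
--     :return: dicts mapping image index to list of matching text indices and vice versa
--     """
--     text_to_images = defaultdict(list)
--     for uid, text in zip(uids, texts):
--         text = text.strip().lower()
--         text_to_images[text].append(uid)
--
--     img2txt = dict()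
--     for uid, text in zip(uids, texts):
--         text = text.strip().lower()
--         matching_uids = text_to_images[text]
--         img2txt[uid] = matching_uids
--
--     return img2txt
-- ===== SOURCE B (Python) =====
-- def build_image_text_similarity_mappings(texts, uids):
--     norm = [t.strip().lower() for t in texts]
--     return {u: [v for v, m in zip(uids, norm) if m == k]
--             for u, k in zip(uids, norm)}
-- ===== Notes on version B (the rewrite author's own statement) =====
-- stated objective: simpler
-- what changed: B drops the grouping dict entirely: it normalizes the texts once and builds the result as a single dict comprehension whose value for each uid is a direct filter of the (uid, normalized-text) pairs sharing its text, instead of A's two accumulator loops over a defaultdict.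
import Mathlib
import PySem

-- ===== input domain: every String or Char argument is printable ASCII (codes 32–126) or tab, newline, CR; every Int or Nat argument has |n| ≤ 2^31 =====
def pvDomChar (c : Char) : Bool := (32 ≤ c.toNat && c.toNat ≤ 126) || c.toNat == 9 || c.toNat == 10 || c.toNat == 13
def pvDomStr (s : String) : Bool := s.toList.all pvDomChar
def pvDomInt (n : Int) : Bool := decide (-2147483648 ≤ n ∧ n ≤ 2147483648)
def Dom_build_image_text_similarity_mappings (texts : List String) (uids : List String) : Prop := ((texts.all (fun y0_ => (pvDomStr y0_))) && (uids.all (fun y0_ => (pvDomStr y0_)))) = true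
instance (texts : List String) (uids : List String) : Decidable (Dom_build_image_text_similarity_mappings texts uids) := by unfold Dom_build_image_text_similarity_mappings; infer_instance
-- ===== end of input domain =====

-- B replaces A's two defaultdict-accumulating loops by one normalization pass plus a dict
-- comprehension that filters the matching (uid, text) pairs per uid (simpler; no grouping dict).

-- ===== PORT A =====
def build_image_text_similarity_mappings (texts : List String) (uids : List String) : List (String × List String) :=
  -- text_to_images = defaultdict(list); for uid, text in zip(uids, texts): text_to_images[text.strip().lower()].append(uid)
  let text_to_images : PySem.Dict String (List String) :=
    (uids.zip texts).foldl
      (fun d p => d.modify (PySem.Str.lower (PySem.Str.strip p.2)) [] (fun l => l ++ [p.1]))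
      PySem.Dict.empty
  -- img2txt = dict(); for uid, text in zip(uids, texts): img2txt[uid] = text_to_images[text.strip().lower()]
  let img2txt : PySem.Dict String (List String) :=
    (uids.zip texts).foldl
      (fun m p => m.insert p.1 (text_to_images.getD (PySem.Str.lower (PySem.Str.strip p.2)) []))
      PySem.Dict.empty
  img2txt.items

-- ===== PORT B =====
def build_image_text_similarity_mappings_alt (texts : List String) (uids : List String) : List (String × List String) :=
  -- norm = [t.strip().lower() for t in texts]
  let norm := texts.map (fun t => PySem.Str.lower (PySem.Str.strip t))
  -- {u: [v for v, m in zip(uids, norm) if m == k] for u, k in zip(uids, norm)}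
  ((uids.zip norm).foldl
    (fun m p => m.insert p.1 (((uids.zip norm).filter (fun q => q.2 == p.2)).map Prod.fst))
    (PySem.Dict.empty : PySem.Dict String (List String))).items

-- ===== PRECONDITION & SPEC =====
def Spec_build_image_text_similarity_mappings (texts : List String) (uids : List String) (out : List (String × List String)) : Prop := out = build_image_text_similarity_mappings_alt texts uids
instance (texts : List String) (uids : List String) (out : List (String × List String)) : Decidable (Spec_build_image_text_similarity_mappings texts uids out) := by unfold Spec_build_image_text_similarity_mappings; infer_instance

-- ===== CLAIM (what is proved, stated in full; the proofs are below) =====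
def Claim_equal_build_image_text_similarity_mappings : Prop := ∀ (texts : List String) (uids : List String), Dom_build_image_text_similarity_mappings texts uids → Spec_build_image_text_similarity_mappings texts uids (build_image_text_similarity_mappings texts uids)

-- ===== LEMMAS AND PROOFS =====

-- A's first loop groups uids by normalized text: its getD at any key is the filtered projection.
theorem getD_group_loop (l : List (String × String)) (d : PySem.Dict String (List String)) (k : String) :
    (l.foldl (fun d p => d.modify (PySem.Str.lower (PySem.Str.strip p.2)) [] (fun l => l ++ [p.1])) d).getD k []
      = d.getD k [] ++ ((l.filter (fun p => PySem.Str.lower (PySem.Str.strip p.2) == k)).map Prod.fst) := by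
  induction l generalizing d with
  | nil => simp
  | cons p t ih =>
    simp only [List.foldl_cons, ih, List.filter_cons]
    by_cases h : PySem.Str.lower (PySem.Str.strip p.2) = k
    · subst h
      simp [PySem.Dict.getD_modify_self]
    · rw [PySem.Dict.getD_modify_of_ne d [] _ (fun he => h he.symm)]
      simp [h]

set_option maxHeartbeats 1000000 in
theorem build_image_text_similarity_mappings_eq (texts uids : List String) :
    build_image_text_similarity_mappings texts uids = build_image_text_similarity_mappings_alt texts uids := by
  simp only [build_image_text_similarity_mappings, build_image_text_similarity_mappings_alt,
    List.zip_map_right, List.foldl_map, List.filter_map, List.map_map]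
  refine congrArg PySem.Dict.items (PySem.List.foldl_congr_mem _ _ _ _ ?_)
  intro acc p hp
  simp only [Prod.map_fst, Prod.map_snd, id_eq]
  rw [getD_group_loop]
  simp [Function.comp_def, Prod.map_fst, Prod.map_snd, PySem.Dict.getD_empty]

-- ===== VERDICT (by name: the statement is the Claim_ definition above) =====
theorem build_image_text_similarity_mappings_spec : Claim_equal_build_image_text_similarity_mappings := by
  intro texts uids _
  exact build_image_text_similarity_mappings_eq texts uids
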